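-- pv_equiv track=rewrite | github.com/choco9966/Algorithm-Master | elice/데이터 구조/재귀호출 응용 및 힙/두번째최대값.py | getMax2
-- ===== SOURCE A (Python) =====
-- def getMax2(n, myMatrix):
--     '''
--     크기 n x n 의 행렬 myMatrix내의 원소의 합, 최댓값, 두 번째 최댓값을 반환하는 함수.
--
--     만약 myMatrix = [[1, 2, 3], [2, 3, 4], [3, 3, 4]]라면 (25, 4, 3) 을 반환한다.
--     '''
--
--     mySum = 0
--     myMax = 0
--     myMax2 = 0
--
--     for matrix in myMatrix :
--         for num in matrix :
--             mySum += num
--             if myMax2 < num :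
--                 if myMax < num :
--                     myMax2,myMax = myMax,num
--                 elif myMax > num :
--                     myMax2 = num
--
--     return (mySum, myMax, myMax2)
-- ===== SOURCE B (Python) =====
-- def getMax2(n, myMatrix):
--     values = [num for row in myMatrix for num in row]
--     m1 = max(values + [0])
--     m2 = max([v for v in values if v < m1] + [0])
--     return (sum(values), m1, m2)
-- ===== Notes on version B (the rewrite author's own statement) =====
-- stated objective: simpler
-- what changed: Replaces A's single nested scan with running top-two scalar state by flattening once and computing sum, max(values+[0]) and max of the values strictly below that max (again with a 0 baseline) as separate reductions.
import Mathlib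
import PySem

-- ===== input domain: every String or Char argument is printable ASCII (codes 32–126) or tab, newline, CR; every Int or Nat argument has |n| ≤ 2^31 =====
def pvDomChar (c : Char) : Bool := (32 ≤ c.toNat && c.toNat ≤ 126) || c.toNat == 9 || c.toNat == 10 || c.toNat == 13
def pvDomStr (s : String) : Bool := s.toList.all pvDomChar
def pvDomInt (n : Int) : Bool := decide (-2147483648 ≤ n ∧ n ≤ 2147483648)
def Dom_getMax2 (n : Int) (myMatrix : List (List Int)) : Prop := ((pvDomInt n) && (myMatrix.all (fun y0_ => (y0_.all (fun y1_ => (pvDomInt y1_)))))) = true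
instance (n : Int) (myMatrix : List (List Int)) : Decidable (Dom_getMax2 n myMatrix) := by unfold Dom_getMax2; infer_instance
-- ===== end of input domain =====

-- B flattens the matrix once and replaces A's running top-two scalar scan by a sum and two
-- max-reductions (the second over the values strictly below the first); same results, simpler data flow.

-- ===== PORT A =====
-- one loop step of A's inner 'for num in matrix' body on the state (mySum, myMax, myMax2)
def getMax2Step (st : Int × Int × Int) (num : Int) : Int × Int × Int :=
  let s := st.1 + num
  if st.2.2 < num then
    if st.2.1 < num then (s, num, st.2.1)
    else if st.2.1 > num then (s, st.2.1, num)
    else (s, st.2.1, st.2.2)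
  else (s, st.2.1, st.2.2)

def getMax2 (n : Int) (myMatrix : List (List Int)) : Int × Int × Int :=
  myMatrix.foldl (fun st matrix => matrix.foldl getMax2Step st) (0, 0, 0)

-- ===== PORT B =====
-- Python 'max(xs)' on a list that always ends with a literal 0, so 'none' is unreachable
def pyMaxD (xs : List Int) : Int :=
  match PySem.List.max? xs (fun v : Int => v) with
  | some m => m
  | none => 0

def getMax2_alt (n : Int) (myMatrix : List (List Int)) : Int × Int × Int :=
  let values := myMatrix.flatMap (fun row => row)
  let m1 : Int := pyMaxD (values ++ [0])
  let m2 : Int := pyMaxD ((values.filter (fun v => decide (v < m1))) ++ [0])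
  (values.sum, m1, m2)

-- ===== PRECONDITION & SPEC =====
def Spec_getMax2 (n : Int) (myMatrix : List (List Int)) (out : Int × Int × Int) : Prop := out = getMax2_alt n myMatrix
instance (n : Int) (myMatrix : List (List Int)) (out : Int × Int × Int) : Decidable (Spec_getMax2 n myMatrix out) := by unfold Spec_getMax2; infer_instance

-- ===== CLAIM (what is proved, stated in full; the proofs are below) =====
def Claim_equal_getMax2 : Prop := ∀ (n : Int) (myMatrix : List (List Int)), Dom_getMax2 n myMatrix → Spec_getMax2 n myMatrix (getMax2 n myMatrix)

-- ===== LEMMAS AND PROOFS =====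

-- abbreviations used only by the proofs
def runMax (l : List Int) : Int := l.foldl max 0
def runSec (l : List Int) : Int := (l.filter (fun v => decide (v < runMax l))).foldl max 0

theorem foldl_max_init (t : List Int) : ∀ a b : Int, t.foldl max (max a b) = max a (t.foldl max b) := by
  induction t with
  | nil => intro a b; rfl
  | cons c t ih =>
      intro a b
      simp only [List.foldl_cons]
      rw [max_assoc, ih]

theorem foldl_max_le (t : List Int) : ∀ b c : Int, b ≤ c → (∀ y ∈ t, y ≤ c) → t.foldl max b ≤ c := by
  induction t with
  | nil => intro b c hb _; simpa using hb
  | cons x t ih =>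
      intro b c hb hm
      simp only [List.foldl_cons]
      exact ih _ _ (max_le hb (hm x (by simp))) (fun y hy => hm y (by simp [hy]))

theorem runMax_nonneg (l : List Int) : 0 ≤ runMax l :=
  (PySem.List.le_foldl_max l 0).1

theorem runMax_mem (l : List Int) : ∀ y ∈ l, y ≤ runMax l :=
  (PySem.List.le_foldl_max l 0).2

theorem runSec_le (l : List Int) : runSec l ≤ runMax l := by
  refine foldl_max_le _ 0 _ (runMax_nonneg l) ?_
  intro y hy
  exact runMax_mem l y (List.mem_of_mem_filter hy)

-- Python max(l + [0]) is the running max with floor 0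
theorem max?_append_zero (l : List Int) :
    PySem.List.max? (l ++ [0]) (fun v : Int => v) = some (runMax l) := by
  cases l with
  | nil => rfl
  | cons h t =>
      rw [List.cons_append, PySem.List.max?_id_cons, List.foldl_append]
      simp only [List.foldl_cons, List.foldl_nil]
      congr 1
      show max (t.foldl max h) 0 = (h :: t).foldl max 0
      simp only [List.foldl_cons]
      rw [max_comm, show max (0:Int) h = max 0 h from rfl]
      rw [foldl_max_init t 0 h]

theorem pyMaxD_append_zero (l : List Int) : pyMaxD (l ++ [0]) = runMax l := by
  rw [pyMaxD, max?_append_zero]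

-- the invariant of A's loop over the flattened element list
theorem fold_step_eq (l : List Int) :
    l.foldl getMax2Step (0, 0, 0) = (l.sum, runMax l, runSec l) := by
  induction l using List.reverseRecOn with
  | nil => rfl
  | append_singleton p x ih =>
      rw [List.foldl_append, ih]
      simp only [List.foldl_cons, List.foldl_nil]
      have hM0 : 0 ≤ runMax p := runMax_nonneg p
      have hmem : ∀ y ∈ p, y ≤ runMax p := runMax_mem p
      have hS : runSec p ≤ runMax p := runSec_le p
      have hMnew : runMax (p ++ [x]) = max (runMax p) x := by
        simp [runMax, List.foldl_append]
      rcases lt_trichotomy (runMax p) x with hlt | heq | hgt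
      · -- x strictly greater: new max is x, new second is old max
        have hfilter : (p ++ [x]).filter (fun v => decide (v < runMax (p ++ [x]))) = p := by
          rw [hMnew, max_eq_right hlt.le, List.filter_append]
          have h1 : p.filter (fun v => decide (v < x)) = p :=
            List.filter_eq_self.mpr (fun y hy => by
              simpa using lt_of_le_of_lt (hmem y hy) hlt)
          have h2 : [x].filter (fun v => decide (v < x)) = [] := by simp
          rw [h1, h2, List.append_nil]
        have hSnew : runSec (p ++ [x]) = runMax p := by
          rw [runSec, hfilter]; rfl
        simp only [getMax2Step]
        rw [if_pos (lt_of_le_of_lt hS hlt), if_pos hlt]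
        rw [hMnew, max_eq_right hlt.le, hSnew]
        simp
      · -- x equals the current max: nothing changes
        subst heq
        have hfilter : (p ++ [runMax p]).filter (fun v => decide (v < runMax (p ++ [runMax p]))) =
            p.filter (fun v => decide (v < runMax p)) := by
          rw [hMnew, max_self, List.filter_append]
          simp
        have hSnew : runSec (p ++ [runMax p]) = runSec p := by
          rw [runSec, hfilter]; rfl
        simp only [getMax2Step]
        rw [hMnew, max_self, hSnew]
        by_cases h : runSec p < runMax p
        · rw [if_pos h, if_neg (lt_irrefl (runMax p)), if_neg (lt_irrefl (runMax p))]
          simp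
        · rw [if_neg h]; simp
      · -- x strictly smaller: max unchanged, second becomes max(second, x)
        have hfilter : (p ++ [x]).filter (fun v => decide (v < runMax (p ++ [x]))) =
            p.filter (fun v => decide (v < runMax p)) ++ [x] := by
          rw [hMnew, max_eq_left hgt.le, List.filter_append]
          simp [hgt]
        have hSnew : runSec (p ++ [x]) = max (runSec p) x := by
          rw [runSec, hfilter, List.foldl_append]
          simp [runSec, runMax]
        simp only [getMax2Step]
        rw [hMnew, max_eq_left hgt.le, hSnew]
        by_cases h : runSec p < x
        · rw [if_pos h, if_neg (not_lt.mpr hgt.le), if_pos hgt]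
          simp [max_eq_right h.le]
        · rw [if_neg h]
          simp [max_eq_left (not_lt.mp h)]

-- ===== VERDICT (by name: the statement is the Claim_ definition above) =====
theorem getMax2_spec : Claim_equal_getMax2 := by
  intro n myMatrix _
  show getMax2 n myMatrix = getMax2_alt n myMatrix
  have hflat : getMax2 n myMatrix
      = (myMatrix.flatten.sum, runMax myMatrix.flatten, runSec myMatrix.flatten) := by
    unfold getMax2
    rw [← List.foldl_flatten, fold_step_eq]
  rw [hflat]
  simp only [getMax2_alt, List.flatMap_id', pyMaxD_append_zero, runSec]
  rfl
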